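-- pv_equiv track=rewrite | github.com/rafaelbelda/rolfsound-web | api/services/indexer.py | _discogs_display_artist
-- ===== SOURCE A (Python) =====
-- def _discogs_display_artist(credits: list[dict]) -> str | None:
--     if not credits:
--         return None
--     ordered = sorted(credits, key=lambda c: int(c.get("position") or 0))
--     parts: list[str] = []
--     for idx, credit in enumerate(ordered):
--         if idx > 0:
--             parts.append(ordered[idx - 1].get("join_phrase") or ", ")
--         parts.append(credit.get("name") or "")
--     return "".join(parts).strip() or None
-- ===== SOURCE B (Python) =====
-- def _discogs_display_artist(credits: list[dict]) -> str | None: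
--     if not credits:
--         return None
--     ordered = sorted(credits, key=lambda c: int(c.get("position") or 0))
--
--     def render(chunk: list[dict]) -> str:
--         head, rest = chunk[0], chunk[1:]
--         if not rest:
--             return head.get("name") or ""
--         return (head.get("name") or "") + (head.get("join_phrase") or ", ") + render(rest)
--
--     return render(ordered).strip() or None
-- ===== Notes on version B (the rewrite author's own statement) =====
-- stated objective: simpler
-- what changed: Replaces A's parts-list built via enumerate with an idx>0 back-reference into ordered[idx-1] by a direct structural recursion over the sorted list in which each credit contributes its own name and join_phrase and the last credit contributes only its name.
import Mathlib
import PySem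

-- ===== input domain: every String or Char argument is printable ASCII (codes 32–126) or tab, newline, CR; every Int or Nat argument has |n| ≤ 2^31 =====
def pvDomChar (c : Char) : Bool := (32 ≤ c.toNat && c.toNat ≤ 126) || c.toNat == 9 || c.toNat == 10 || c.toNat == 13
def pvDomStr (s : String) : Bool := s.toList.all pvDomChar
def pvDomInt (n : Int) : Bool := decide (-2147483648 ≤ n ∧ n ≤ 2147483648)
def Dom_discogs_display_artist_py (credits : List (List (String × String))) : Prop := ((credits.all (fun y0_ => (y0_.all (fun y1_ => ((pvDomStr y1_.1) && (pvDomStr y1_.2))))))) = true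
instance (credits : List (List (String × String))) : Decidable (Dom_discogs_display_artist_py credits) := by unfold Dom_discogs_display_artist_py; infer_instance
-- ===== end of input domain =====

-- B replaces A's enumerate/idx>0/ordered[idx-1] back-reference by a structural recursion over the
-- sorted list in which each credit contributes its OWN join_phrase (objective: simpler decomposition; same cost).

-- shared helper: Python's `x or d` for x an Optional[str]
def pvOr (o : Option String) (d : String) : String :=
  match o with
  | none => d
  | some s => if s = "" then d else s

-- shared helper: the sort key  int(c.get("position") or 0)  (total; Pre_ rules out the ValueError case)
def pvKey (c : List (String × String)) : Int :=
  match c.lookup "position" with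
  | none => 0
  | some s => if s = "" then 0 else (PySem.Int.ofStr? s).getD 0

-- ===== PORT A =====
def discogs_display_artist_py (credits : List (List (String × String))) : Option String :=
  if credits = [] then none
  else
    let ordered := PySem.List.sorted credits pvKey
    let parts : List String :=
      (PySem.List.enumerate ordered).foldl
        (fun parts p =>
          parts ++ ((if 0 < p.1 then
                       [pvOr ((PySem.List.pyGetD ordered (p.1 - 1) []).lookup "join_phrase") ", "]
                     else []) ++ [pvOr (p.2.lookup "name") ""])) []
    let s := PySem.Str.strip (PySem.Str.join "" parts)
    if s = "" then none else some s

-- ===== PORT B =====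
-- Source B's `render`: head carries its own name and join_phrase, recursion on the tail
def pvRender : List (List (String × String)) → String
  | [] => ""            -- unreachable (render is only called on a nonempty list); totality guard
  | [c] => pvOr (c.lookup "name") ""
  | c :: rest => pvOr (c.lookup "name") "" ++ pvOr (c.lookup "join_phrase") ", " ++ pvRender rest

def discogs_display_artist_py_alt (credits : List (List (String × String))) : Option String :=
  if credits = [] then none
  else
    let ordered := PySem.List.sorted credits pvKey
    let s := PySem.Str.strip (pvRender ordered)
    if s = "" then none else some s

-- ===== PRECONDITION & SPEC =====
-- Pre_ excludes exactly the inputs where int(c.get("position")) raises ValueError in A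
-- (a non-empty "position" value that is not an int literal); B raises there too.
def Pre_discogs_display_artist_py (credits : List (List (String × String))) : Prop :=
  credits.all (fun c =>
    match c.lookup "position" with
    | none => true
    | some s => s == "" || (PySem.Int.ofStr? s).isSome) = true
instance (credits : List (List (String × String))) : Decidable (Pre_discogs_display_artist_py credits) := by unfold Pre_discogs_display_artist_py; infer_instance

def pvWitness_discogs_display_artist_py : (List (List (String × String))) :=
  [[("name", "Alice"), ("position", "2")],
   [("name", "Bob"), ("position", "1"), ("join_phrase", " & ")]]

def Spec_discogs_display_artist_py (credits : List (List (String × String))) (out : Option String) : Prop := out = discogs_display_artist_py_alt credits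
instance (credits : List (List (String × String))) (out : Option String) : Decidable (Spec_discogs_display_artist_py credits out) := by unfold Spec_discogs_display_artist_py; infer_instance

-- ===== CLAIM (what is proved, stated in full; the proofs are below) =====
def Claim_equal_discogs_display_artist_py : Prop := ∀ (credits : List (List (String × String))), Dom_discogs_display_artist_py credits → Pre_discogs_display_artist_py credits → Spec_discogs_display_artist_py credits (discogs_display_artist_py credits)

-- ===== LEMMAS AND PROOFS =====

-- abbreviations for the two strings a credit contributes
def pvNm (c : List (String × String)) : String := pvOr (c.lookup "name") ""
def pvJp (c : List (String × String)) : String := pvOr (c.lookup "join_phrase") ", "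

-- the parts that A's loop appends after the first credit, with each join_phrase
-- attributed to the PREVIOUS credit p
def pvTail : List (String × String) → List (List (String × String)) → List String
  | _, [] => []
  | p, y :: ys => pvJp p :: pvNm y :: pvTail y ys

lemma str_join_empty_cons (a : String) (l : List String) :
    PySem.Str.join "" (a :: l) = a ++ PySem.Str.join "" l := by
  apply String.toList_inj.mp
  cases l with
  | nil => simp [PySem.Str.toList_join, PySem.Chars.join_singleton, PySem.Chars.join_nil,
      String.toList_append]
  | cons b t => simp [PySem.Str.toList_join, PySem.Chars.join_cons_cons, String.toList_append]

-- A's flatMap over the enumerated suffix, indices starting at k+1, equals pvTail of the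
-- previous element p = full[k]
lemma pv_tail_flat (full : List (List (String × String))) :
    ∀ (ys : List (List (String × String))) (k : Nat) (p : List (String × String)),
      full[k]? = some p → full.drop (k + 1) = ys →
      (PySem.List.enumerate ys ((k : Int) + 1)).flatMap
        (fun q => (if 0 < q.1 then
                     [pvOr ((PySem.List.pyGetD full (q.1 - 1) []).lookup "join_phrase") ", "]
                   else []) ++ [pvOr (q.2.lookup "name") ""])
        = pvTail p ys := by
  intro ys
  induction ys with
  | nil => intro k p _ _; simp [PySem.List.enumerate, pvTail]
  | cons y ys ih =>
    intro k p hp hdrop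
    rw [PySem.List.enumerate_cons]
    have h0 : (0 : Int) < (k : Int) + 1 := by positivity
    have hprev : PySem.List.pyGetD full ((k : Int) + 1 - 1) ([] : List (String × String)) = p := by
      have : ((k : Int) + 1 - 1) = ((k : Nat) : Int) := by ring
      rw [this, PySem.List.pyGetD_natCast]
      simp [List.getD, hp]
    have hy : full[k + 1]? = some y := by
      have := congrArg (fun l => l[0]?) hdrop
      simpa [List.getElem?_drop] using this
    have hdrop' : full.drop (k + 1 + 1) = ys := by
      rw [← List.drop_drop, hdrop]; rfl
    have ihh := ih (k + 1) y hy hdrop'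
    rw [List.flatMap_cons, if_pos h0, hprev]
    rw [show ((k : Int) + 1 + 1) = (((k + 1 : Nat) : Int) + 1) by push_cast; ring]
    rw [ihh]
    simp [pvTail, pvJp, pvNm]

-- joining pvNm p :: pvTail p ys is exactly Source B's render on p :: ys
lemma pv_join_tail :
    ∀ (ys : List (List (String × String))) (p : List (String × String)),
      PySem.Str.join "" (pvNm p :: pvTail p ys) = pvRender (p :: ys) := by
  intro ys
  induction ys with
  | nil =>
    intro p
    apply String.toList_inj.mp
    simp [PySem.Str.toList_join, PySem.Chars.join_singleton, pvTail, pvRender, pvNm]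
  | cons y ys ih =>
    intro p
    have hy := ih y
    simp only [pvTail]
    rw [str_join_empty_cons, str_join_empty_cons, hy]
    simp [pvRender, pvNm, pvJp, String.append_assoc]

-- A's whole parts construction, joined, is Source B's render, for any nonempty list
lemma pv_parts_eq (x : List (String × String)) (xs : List (List (String × String))) :
    PySem.Str.join ""
      ((PySem.List.enumerate (x :: xs)).foldl
        (fun parts p =>
          parts ++ ((if 0 < p.1 then
                       [pvOr ((PySem.List.pyGetD (x :: xs) (p.1 - 1) []).lookup "join_phrase") ", "]
                     else []) ++ [pvOr (p.2.lookup "name") ""])) [])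
      = pvRender (x :: xs) := by
  rw [PySem.List.foldl_append_eq_flatMap]
  have htail := pv_tail_flat (x :: xs) xs 0 x rfl rfl
  rw [show PySem.List.enumerate (x :: xs) = (0, x) :: PySem.List.enumerate xs (0 + 1) from
    PySem.List.enumerate_cons x xs 0]
  simp only [List.flatMap_cons, List.nil_append]
  norm_num at htail ⊢
  rw [htail]
  exact pv_join_tail xs x

-- ===== VERDICT (by name: the statement is the Claim_ definition above) =====
theorem discogs_display_artist_py_spec : Claim_equal_discogs_display_artist_py := by
  intro credits _ _
  unfold Spec_discogs_display_artist_py discogs_display_artist_py discogs_display_artist_py_alt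
  by_cases h : credits = []
  · simp [h]
  · simp only [if_neg h]
    cases hs : PySem.List.sorted credits pvKey with
    | nil => exact absurd ((PySem.List.sorted_eq_nil_iff credits pvKey false).mp hs) h
    | cons x xs =>
      have := pv_parts_eq x xs
      simp only [this]
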